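-- pv_equiv track=rewrite | github.com/JustTrying-Arduino/HA-Agent | my-agent/agent/telegram.py | _split_html_blocks
-- ===== SOURCE A (Python) =====
-- def _split_html_blocks(text: str) -> list[str]:
--     if not text:
--         return []
--
--     blocks: list[str] = []
--     current: list[str] = []
--     i = 0
--     lowered = text.lower()
--     in_pre = False
--
--     while i < len(text):
--         if lowered.startswith("<pre>", i):
--             in_pre = True
--             current.append(text[i:i + 5])
--             i += 5
--             continue
--         if lowered.startswith("</pre>", i):
--             in_pre = False
--             current.append(text[i:i + 6])
--             i += 6
--             continue
--         if not in_pre and text.startswith("\n\n", i):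
--             blocks.append("".join(current))
--             current = []
--             i += 2
--             continue
--
--         current.append(text[i])
--         i += 1
--
--     blocks.append("".join(current))
--     return blocks
-- ===== SOURCE B (Python) =====
-- def _split_html_blocks(text: str) -> list[str]:
--     if not text:
--         return []
--     # Pass 1: tokenize into text runs and delimiter tokens, left to right.
--     tokens = []
--     buf = []
--     low = text.lower()
--     i = 0
--     n = len(text)
--     while i < n:
--         if low.startswith("<pre>", i):
--             tokens.append(("t", "".join(buf))); buf = []
--             tokens.append(("p", text[i:i + 5])); i += 5
--         elif low.startswith("</pre>", i):
--             tokens.append(("t", "".join(buf))); buf = []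
--             tokens.append(("e", text[i:i + 6])); i += 6
--         elif text.startswith("\n\n", i):
--             tokens.append(("t", "".join(buf))); buf = []
--             tokens.append(("n", text[i:i + 2])); i += 2
--         else:
--             buf.append(text[i]); i += 1
--     tokens.append(("t", "".join(buf)))
--     # Pass 2: fold over the token stream with an in_pre state machine.
--     blocks = []
--     current = []
--     in_pre = False
--     for kind, s in tokens:
--         if kind == "p":
--             in_pre = True
--             current.append(s)
--         elif kind == "e":
--             in_pre = False
--             current.append(s)
--         elif kind == "n":
--             if in_pre:
--                 current.append(s)
--             else:
--                 blocks.append("".join(current))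
--                 current = []
--         else:
--             current.append(s)
--     blocks.append("".join(current))
--     return blocks
-- ===== Notes on version B (the rewrite author's own statement) =====
-- stated objective: alternative
-- what changed: A's single char-by-char scan with an in_pre flag is replaced by a two-pass decomposition: first tokenize the text into delimiter/text tokens left to right, then fold an in_pre state machine over the token stream (blank-line tokens are produced unconditionally and only interpreted as block breaks in the second pass).
import Mathlib
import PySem

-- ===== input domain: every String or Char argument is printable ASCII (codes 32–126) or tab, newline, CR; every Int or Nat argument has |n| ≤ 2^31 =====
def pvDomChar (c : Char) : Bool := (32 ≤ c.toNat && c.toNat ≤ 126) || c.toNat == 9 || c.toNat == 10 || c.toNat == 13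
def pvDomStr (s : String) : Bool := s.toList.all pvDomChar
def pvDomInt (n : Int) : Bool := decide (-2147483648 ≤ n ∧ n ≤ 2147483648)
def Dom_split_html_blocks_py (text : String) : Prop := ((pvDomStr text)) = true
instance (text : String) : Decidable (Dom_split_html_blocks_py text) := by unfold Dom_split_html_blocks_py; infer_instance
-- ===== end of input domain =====

-- B replaces A's single char-by-char state machine by a two-pass decomposition
-- (tokenize into delimiter/text tokens, then fold a state machine over the tokens);
-- objective: alternative structure, same cost.

-- ===== PORT A =====
def pvPreTag : List Char := ['<', 'p', 'r', 'e', '>']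
def pvEndTag : List Char := ['<', '/', 'p', 'r', 'e', '>']
def pvNN : List Char := ['\n', '\n']

-- the while loop of A: cs is the suffix text[i:], blocks/current hold the built pieces
def pvALoop : List Char → List (List Char) → List (List Char) → Bool → List (List Char)
  | [], blocks, current, _ => blocks ++ [PySem.Chars.join [] current]
  | c :: rest, blocks, current, inPre =>
    if PySem.Chars.startswith (PySem.Chars.lower (c :: rest)) pvPreTag then
      pvALoop ((c :: rest).drop 5) blocks (current ++ [(c :: rest).take 5]) true
    else if PySem.Chars.startswith (PySem.Chars.lower (c :: rest)) pvEndTag then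
      pvALoop ((c :: rest).drop 6) blocks (current ++ [(c :: rest).take 6]) false
    else if !inPre && PySem.Chars.startswith (c :: rest) pvNN then
      pvALoop ((c :: rest).drop 2) (blocks ++ [PySem.Chars.join [] current]) [] inPre
    else
      pvALoop rest blocks (current ++ [[c]]) inPre
termination_by cs _ _ _ => cs.length
decreasing_by all_goals simp; try omega

def split_html_blocks_py (text : String) : List String :=
  if text.toList = [] then []
  else (pvALoop text.toList [] [] false).map String.ofList

-- ===== PORT B =====
-- pass 1 of B: split the text into tokens (kind, payload); kinds 't' text, 'p' <pre>, 'e' </pre>, 'n' blank line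
def pvTokenize : List Char → List Char → List (List Char × List Char)
  | [], buf => [(['t'], buf)]
  | c :: rest, buf =>
    if PySem.Chars.startswith (PySem.Chars.lower (c :: rest)) pvPreTag then
      (['t'], buf) :: (['p'], (c :: rest).take 5) :: pvTokenize ((c :: rest).drop 5) []
    else if PySem.Chars.startswith (PySem.Chars.lower (c :: rest)) pvEndTag then
      (['t'], buf) :: (['e'], (c :: rest).take 6) :: pvTokenize ((c :: rest).drop 6) []
    else if PySem.Chars.startswith (c :: rest) pvNN then
      (['t'], buf) :: (['n'], (c :: rest).take 2) :: pvTokenize ((c :: rest).drop 2) []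
    else
      pvTokenize rest (buf ++ [c])
termination_by cs _ => cs.length
decreasing_by all_goals simp; try omega

-- pass 2 of B: fold the in_pre state machine over the token stream
def pvPhase2 : List (List Char × List Char) → List (List Char) → List (List Char) → Bool → List (List Char)
  | [], blocks, current, _ => blocks ++ [PySem.Chars.join [] current]
  | (k, s) :: ts, blocks, current, inPre =>
    if k = ['p'] then pvPhase2 ts blocks (current ++ [s]) true
    else if k = ['e'] then pvPhase2 ts blocks (current ++ [s]) false
    else if k = ['n'] then
      if inPre then pvPhase2 ts blocks (current ++ [s]) inPre
      else pvPhase2 ts (blocks ++ [PySem.Chars.join [] current]) [] inPre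
    else pvPhase2 ts blocks (current ++ [s]) inPre

def split_html_blocks_py_alt (text : String) : List String :=
  if text.toList = [] then []
  else (pvPhase2 (pvTokenize text.toList []) [] [] false).map String.ofList

-- ===== PRECONDITION & SPEC =====
def Spec_split_html_blocks_py (text : String) (out : List String) : Prop := out = split_html_blocks_py_alt text
instance (text : String) (out : List String) : Decidable (Spec_split_html_blocks_py text out) := by unfold Spec_split_html_blocks_py; infer_instance

-- ===== CLAIM (what is proved, stated in full; the proofs are below) =====
def Claim_equal_split_html_blocks_py : Prop := ∀ (text : String), Dom_split_html_blocks_py text → Spec_split_html_blocks_py text (split_html_blocks_py text)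

-- ===== LEMMAS AND PROOFS =====

lemma pvInterNil : ∀ l : List (List Char), (List.intersperse ([] : List Char) l).flatten = l.flatten
  | [] => rfl
  | [_] => rfl
  | a :: b :: t => by
    rw [List.intersperse_cons₂]
    simp [pvInterNil (b :: t)]

lemma pvJoin_eq (l : List (List Char)) : PySem.Chars.join [] l = l.flatten := by
  simpa [PySem.Chars.join, List.intercalate] using pvInterNil l

lemma pvSW_cons_false {x y : Char} (l q : List Char) (h : y ≠ x) :
    PySem.Chars.startswith (x :: l) (y :: q) = false := by
  rw [Bool.eq_false_iff]
  intro hc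
  exact h (List.cons_prefix_cons.1 ((PySem.Chars.startswith_iff _ _).1 hc)).1

-- pvALoop depends on `current` only through its concatenation
lemma pvALoop_congr : ∀ (cs : List Char) (blocks c1 c2 : List (List Char)) (p : Bool),
    c1.flatten = c2.flatten → pvALoop cs blocks c1 p = pvALoop cs blocks c2 p
  | [], blocks, c1, c2, p, h => by simp [pvALoop, pvJoin_eq, h]
  | c :: rest, blocks, c1, c2, p, h => by
    rw [pvALoop, pvALoop]
    split_ifs with h1 h2 h3
    · exact pvALoop_congr _ _ _ _ _ (by simp [h])
    · exact pvALoop_congr _ _ _ _ _ (by simp [h])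
    · rw [pvJoin_eq, pvJoin_eq, h]
    · exact pvALoop_congr _ _ _ _ _ (by simp [h])
termination_by cs _ _ _ _ _ => cs.length
decreasing_by all_goals simp; try omega

lemma pvSW_nl_pre (tl : List Char) :
    PySem.Chars.startswith (PySem.Chars.lower ('\n' :: tl)) pvPreTag = false := by
  simpa [PySem.Chars.lower, pvPreTag] using
    pvSW_cons_false (x := PySem.Chars.lowerChar '\n')
      (List.map PySem.Chars.lowerChar tl) ['p', 'r', 'e', '>'] (by decide)

lemma pvSW_nl_end (tl : List Char) :
    PySem.Chars.startswith (PySem.Chars.lower ('\n' :: tl)) pvEndTag = false := by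
  simpa [PySem.Chars.lower, pvEndTag] using
    pvSW_cons_false (x := PySem.Chars.lowerChar '\n')
      (List.map PySem.Chars.lowerChar tl) ['/', 'p', 'r', 'e', '>'] (by decide)

-- the heart: B's two passes compute exactly A's loop
lemma pvMain : ∀ (cs buf : List Char) (blocks cur : List (List Char)) (p : Bool),
    pvPhase2 (pvTokenize cs buf) blocks cur p = pvALoop cs blocks (cur ++ [buf]) p
  | [], buf, blocks, cur, p => by
    simp [pvTokenize, pvPhase2, pvALoop]
  | c :: rest, buf, blocks, cur, p => by
    rw [pvTokenize, pvALoop]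
    cases h1 : PySem.Chars.startswith (PySem.Chars.lower (c :: rest)) pvPreTag with
    | true =>
      -- "<pre>" token
      simp [pvPhase2]
      rw [pvMain]
      exact pvALoop_congr _ _ _ _ _ (by simp)
    | false =>
    cases h2 : PySem.Chars.startswith (PySem.Chars.lower (c :: rest)) pvEndTag with
    | true =>
      -- "</pre>" token
      simp [pvPhase2]
      rw [pvMain]
      exact pvALoop_congr _ _ _ _ _ (by simp)
    | false =>
    cases h3 : PySem.Chars.startswith (c :: rest) pvNN with
    | true =>
      -- "\n\n": B tokenizes it unconditionally, pass 2 resolves in_pre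
      have hpre := (PySem.Chars.startswith_iff _ _).1 h3
      rw [show pvNN = '\n' :: ['\n'] from rfl] at hpre
      obtain ⟨hc, hrest⟩ := List.cons_prefix_cons.1 hpre
      obtain ⟨tl, htl⟩ : ∃ tl, rest = '\n' :: tl := by
        cases rest with
        | nil => simp at hrest
        | cons r rt => exact ⟨rt, by rw [(List.cons_prefix_cons.1 hrest).1]⟩
      subst hc htl
      cases p with
      | false =>
        simp [pvPhase2]
        rw [pvMain]
        exact pvALoop_congr _ _ _ _ _ (by simp)
      | true =>
        -- A consumes the two newline characters one at a time
        simp [pvPhase2]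
        rw [pvALoop, pvSW_nl_pre, pvSW_nl_end]
        simp
        rw [pvMain]
        exact pvALoop_congr _ _ _ _ _ (by simp)
    | false =>
      -- ordinary character
      simp
      rw [pvMain]
      exact pvALoop_congr _ _ _ _ _ (by simp)
  termination_by cs _ _ _ _ => cs.length
  decreasing_by all_goals simp_all; try omega

-- ===== VERDICT (by name: the statement is the Claim_ definition above) =====
theorem split_html_blocks_py_spec : Claim_equal_split_html_blocks_py := by
  intro text _
  unfold Spec_split_html_blocks_py split_html_blocks_py split_html_blocks_py_alt
  by_cases h : text.toList = []
  · simp [h]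
  · simp only [if_neg h]
    rw [pvMain]
    exact congrArg (List.map String.ofList) (pvALoop_congr _ _ _ _ _ (by simp)).symm
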